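-- pv_equiv track=rewrite | github.com/logan-lampton/neetcode | leetcode/2221_Find_Triangular_Sum_of_an_Array.py | triangularSum
-- ===== SOURCE A (Python) =====
-- def triangularSum(nums):
--     n = len(nums)
--     if n == 1:
--         return nums[0]
--
--     while n > 1:
--         newNums = [0] * (n - 1)
--
--         i = 0
--         while i < n - 1:
--             newNums[i] = (nums[i] + nums[i + 1]) % 10
--             i += 1
--
--         nums = newNums
--         n = len(nums)
--
--     return nums[0]
-- ===== SOURCE B (Python) =====
-- def triangularSum(nums):
--     # Closed form: result = (sum of C(n-1, i) * nums[i]) mod 10,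
--     # binomials computed incrementally in one pass.
--     n = len(nums)
--     if n == 1:
--         return nums[0]
--     total = 0
--     c = 1
--     for i, x in enumerate(nums):
--         total += c * x
--         c = c * (n - 1 - i) // (i + 1)
--     return total % 10
-- ===== Notes on version B (the rewrite author's own statement) =====
-- stated objective: faster
-- what changed: Replaces the quadratic repeated adjacent-sum-mod-10 reduction by the closed form (sum of C(n-1,i)*nums[i]) mod 10, computing the binomial coefficients incrementally in a single pass.
import Mathlib
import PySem

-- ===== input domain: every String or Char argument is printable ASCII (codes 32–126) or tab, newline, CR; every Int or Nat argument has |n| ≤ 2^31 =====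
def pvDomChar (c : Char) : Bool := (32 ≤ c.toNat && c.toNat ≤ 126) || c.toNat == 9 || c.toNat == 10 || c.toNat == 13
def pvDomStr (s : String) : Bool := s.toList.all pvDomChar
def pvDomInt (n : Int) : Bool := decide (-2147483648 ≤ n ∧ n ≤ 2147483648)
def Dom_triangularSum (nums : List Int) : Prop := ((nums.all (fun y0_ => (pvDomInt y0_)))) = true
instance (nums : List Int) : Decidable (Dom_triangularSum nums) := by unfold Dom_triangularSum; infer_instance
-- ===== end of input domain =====

-- B replaces A's quadratic repeated adjacent-sum-mod-10 reduction with the closed form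
-- (∑ C(n-1,i)·nums[i]) mod 10, binomials built incrementally in one pass (measured faster, asymptotic).

-- ===== PORT A =====
-- inner while loop: newNums = [0]*(n-1); newNums[i] = (nums[i]+nums[i+1]) % 10 for i in 0..n-2
def stepA (nums : List Int) : List Int :=
  (PySem.List.pyRange 0 ((nums.length : Int) - 1) 1).foldl
    (fun newNums i =>
      PySem.List.pySetD newNums i
        (PySem.Int.mod (PySem.List.pyGetD nums i 0 + PySem.List.pyGetD nums (i + 1) 0) 10))
    (List.replicate ((nums.length : Int) - 1).toNat 0)

theorem length_stepA (nums : List Int) : (stepA nums).length = ((nums.length : Int) - 1).toNat := by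
  unfold stepA
  generalize (PySem.List.pyRange 0 ((nums.length : Int) - 1) 1) = r
  generalize hl : List.replicate ((nums.length : Int) - 1).toNat (0 : Int) = init
  have h0 : init.length = ((nums.length : Int) - 1).toNat := by
    rw [← hl]; simp
  clear hl
  induction r generalizing init with
  | nil => simpa using h0
  | cons a t ih =>
      simp only [List.foldl_cons]
      exact ih _ (by simp [h0])

-- outer while loop: while n > 1
def loopA (nums : List Int) : List Int :=
  if h : 1 < nums.length then loopA (stepA nums) else nums
  termination_by nums.length
  decreasing_by
    rw [length_stepA]; omega

def triangularSum (nums : List Int) : Int :=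
  if nums.length == 1 then
    PySem.List.pyGetD nums 0 0   -- nums[0]; in range since length = 1
  else
    PySem.List.pyGetD (loopA nums) 0 0   -- nums[0]; in range under Pre_ (nums ≠ [])

-- ===== PORT B =====
def triangularSum_alt (nums : List Int) : Int :=
  let n : Int := nums.length
  if nums.length == 1 then
    PySem.List.pyGetD nums 0 0   -- nums[0]; in range since length = 1
  else
    let st : Int × Int :=
      (PySem.List.enumerate nums 0).foldl
        (fun st p => (st.1 + st.2 * p.2, PySem.Int.floordiv (st.2 * (n - 1 - p.1)) (p.1 + 1)))
        (0, 1)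
    PySem.Int.mod st.1 10

-- ===== PRECONDITION & SPEC =====
-- Pre_ excludes only the empty list, on which A raises IndexError (nums[0]).
def Pre_triangularSum (nums : List Int) : Prop := nums ≠ []
instance (nums : List Int) : Decidable (Pre_triangularSum nums) := by
  unfold Pre_triangularSum; infer_instance

def pvWitness_triangularSum : List Int := [3, 17, -2, 8]

def Spec_triangularSum (nums : List Int) (out : Int) : Prop := out = triangularSum_alt nums
instance (nums : List Int) (out : Int) : Decidable (Spec_triangularSum nums out) := by
  unfold Spec_triangularSum; infer_instance

-- ===== CLAIM (what is proved, stated in full; the proofs are below) =====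
def Claim_equal_triangularSum : Prop :=
  ∀ (nums : List Int), Dom_triangularSum nums → Pre_triangularSum nums →
    Spec_triangularSum nums (triangularSum nums)

-- ===== LEMMAS AND PROOFS =====

-- entry i of A's inner pass
def stepF (l : List Int) (i : Nat) : Int :=
  PySem.Int.mod (l.getD i 0 + l.getD (i + 1) 0) 10

theorem fill_foldl (g : Nat → Int) (m : Nat) :
    ∀ k, k ≤ m →
      (List.range k).foldl (fun acc i => acc.set i (g i)) (List.replicate m 0)
        = (List.range k).map g ++ List.replicate (m - k) 0 := by
  intro k
  induction k with
  | zero => simp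
  | succ k ih =>
    intro hk
    rw [List.range_succ, List.foldl_append, ih (by omega)]
    simp only [List.foldl_cons, List.foldl_nil, List.set_append]
    have hlen : ((List.range k).map g).length = k := by simp
    rw [if_neg (by omega)]
    have hrep : List.replicate (m - k) (0 : Int) = 0 :: List.replicate (m - (k + 1)) 0 := by
      have : m - k = (m - (k + 1)) + 1 := by omega
      rw [this, List.replicate_succ]
    rw [hrep, hlen]
    simp

theorem stepA_eq (l : List Int) (h : 1 ≤ l.length) :
    stepA l = (List.range (l.length - 1)).map (stepF l) := by
  unfold stepA
  have h1 : ((l.length : Int) - 1) = ((l.length - 1 : Nat) : Int) := by omega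
  rw [h1, PySem.List.pyRange_zero_nat, List.foldl_map, Int.toNat_natCast]
  have hf : (fun (acc : List Int) (k : Nat) =>
        PySem.List.pySetD acc (k : Int)
          (PySem.Int.mod (PySem.List.pyGetD l (k : Int) 0 + PySem.List.pyGetD l ((k : Int) + 1) 0) 10))
      = fun acc k => acc.set k (stepF l k) := by
    funext acc k
    have hk1 : ((k : Int) + 1) = ((k + 1 : Nat) : Int) := by push_cast; ring
    rw [hk1, PySem.List.pySetD_natCast, PySem.List.pyGetD_natCast, PySem.List.pyGetD_natCast]
    rfl
  rw [hf, fill_foldl _ _ _ le_rfl]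
  simp

-- weighted sum mod 10: the invariant of A's reduction
def wsum (l : List Int) : ZMod 10 :=
  ∑ i ∈ Finset.range l.length,
    (Nat.choose (l.length - 1) i : ZMod 10) * ((l.getD i 0 : Int) : ZMod 10)

theorem cast_pymod (a : Int) : ((PySem.Int.mod a 10 : Int) : ZMod 10) = (a : ZMod 10) := by
  rw [PySem.Int.mod_eq_emod_of_pos (by norm_num)]
  exact_mod_cast ZMod.intCast_mod a 10

theorem pascal_sum (p : Nat) (x : Nat → ZMod 10) :
    ∑ i ∈ Finset.range (p + 1), (Nat.choose p i : ZMod 10) * (x i + x (i + 1))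
      = ∑ i ∈ Finset.range (p + 2), (Nat.choose (p + 1) i : ZMod 10) * x i := by
  have hR : ∑ i ∈ Finset.range (p + 2), (Nat.choose (p + 1) i : ZMod 10) * x i
      = (∑ i ∈ Finset.range (p + 1), (Nat.choose (p + 1) (i + 1) : ZMod 10) * x (i + 1))
          + (Nat.choose (p + 1) 0 : ZMod 10) * x 0 :=
    Finset.sum_range_succ' (fun i => (Nat.choose (p + 1) i : ZMod 10) * x i) (p + 1)
  have hS : ∑ i ∈ Finset.range (p + 2), (Nat.choose p i : ZMod 10) * x i
      = (∑ i ∈ Finset.range (p + 1), (Nat.choose p (i + 1) : ZMod 10) * x (i + 1))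
          + (Nat.choose p 0 : ZMod 10) * x 0 :=
    Finset.sum_range_succ' (fun i => (Nat.choose p i : ZMod 10) * x i) (p + 1)
  have hS2 : ∑ i ∈ Finset.range (p + 2), (Nat.choose p i : ZMod 10) * x i
      = ∑ i ∈ Finset.range (p + 1), (Nat.choose p i : ZMod 10) * x i := by
    rw [Finset.sum_range_succ, Nat.choose_eq_zero_of_lt (by omega)]
    simp
  rw [hR]
  simp only [Nat.choose_succ_succ, Nat.cast_add, add_mul, mul_add]
  rw [Finset.sum_add_distrib, Finset.sum_add_distrib]
  have := hS.symm.trans hS2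
  simp only [Nat.choose_zero_right, Nat.cast_one, one_mul] at this ⊢
  rw [add_assoc, this]
  ring

theorem wsum_step (l : List Int) (h : 2 ≤ l.length) : wsum (stepA l) = wsum l := by
  obtain ⟨p, hp⟩ : ∃ p, l.length = p + 2 := ⟨l.length - 2, by omega⟩
  rw [stepA_eq l (by omega)]
  unfold wsum
  simp only [List.length_map, List.length_range, hp]
  have hentry : ∀ i ∈ Finset.range (p + 1),
      (Nat.choose (p + 2 - 1 - 1) i : ZMod 10)
          * ((((List.range (p + 2 - 1)).map (stepF l)).getD i 0 : Int) : ZMod 10)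
        = (Nat.choose p i : ZMod 10)
            * (((l.getD i 0 : Int) : ZMod 10) + ((l.getD (i + 1) 0 : Int) : ZMod 10)) := by
    intro i hi
    simp only [Finset.mem_range] at hi
    have hi2 : i < ((List.range (p + 2 - 1)).map (stepF l)).length := by simp; omega
    rw [List.getD_eq_getElem _ _ hi2]
    simp only [List.getElem_map, List.getElem_range]
    unfold stepF
    rw [cast_pymod, Int.cast_add]
    norm_num
  have hlen1 : p + 2 - 1 = p + 1 := by omega
  rw [hlen1]
  calc ∑ i ∈ Finset.range (p + 1),
        (Nat.choose (p + 1 - 1) i : ZMod 10)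
          * ((((List.range (p + 1)).map (stepF l)).getD i 0 : Int) : ZMod 10)
      = ∑ i ∈ Finset.range (p + 1),
          (Nat.choose p i : ZMod 10)
            * (((l.getD i 0 : Int) : ZMod 10) + ((l.getD (i + 1) 0 : Int) : ZMod 10)) := by
        refine Finset.sum_congr rfl (fun i hi => ?_)
        have := hentry i hi
        simpa using this
    _ = ∑ i ∈ Finset.range (p + 2),
          (Nat.choose (p + 1) i : ZMod 10) * ((l.getD i 0 : Int) : ZMod 10) :=
        pascal_sum p (fun i => ((l.getD i 0 : Int) : ZMod 10))
    _ = ∑ i ∈ Finset.range (p + 2),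
          (Nat.choose (p + 2 - 1) i : ZMod 10) * ((l.getD i 0 : Int) : ZMod 10) := by
        norm_num

theorem stepA_bounds (l : List Int) (h : 1 ≤ l.length) :
    ∀ x ∈ stepA l, 0 ≤ x ∧ x < 10 := by
  rw [stepA_eq l h]
  intro x hx
  simp only [List.mem_map, List.mem_range] at hx
  obtain ⟨i, -, rfl⟩ := hx
  unfold stepF
  rw [PySem.Int.mod_eq_emod_of_pos (by norm_num)]
  exact ⟨Int.emod_nonneg _ (by norm_num), Int.emod_lt_of_pos _ (by norm_num)⟩

theorem loopA_aux : ∀ (n : Nat) (l : List Int), l.length = n → 1 ≤ n →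
    (∀ x ∈ l, 0 ≤ x ∧ x < 10) →
    ∃ r, loopA l = [r] ∧ 0 ≤ r ∧ r < 10 ∧ ((r : Int) : ZMod 10) = wsum l := by
  intro n
  induction n using Nat.strong_induction_on with
  | _ n ih =>
    intro l hl h1 hb
    by_cases h2 : 1 < l.length
    · obtain ⟨r, hr, h0, h10, hw⟩ :=
        ih (n - 1) (by omega) (stepA l)
          (by rw [length_stepA]; omega) (by omega) (stepA_bounds l (by omega))
      refine ⟨r, ?_, h0, h10, ?_⟩
      · rw [loopA, dif_pos h2, hr]
      · rw [hw, wsum_step l (by omega)]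
    · obtain ⟨a, rfl⟩ : ∃ a, l = [a] := List.length_eq_one_iff.mp (by omega)
      refine ⟨a, ?_, (hb a (by simp)).1, (hb a (by simp)).2, ?_⟩
      · rw [loopA, dif_neg h2]
      · unfold wsum
        simp

theorem loopA_spec (l : List Int) (h : 2 ≤ l.length) :
    ∃ r, loopA l = [r] ∧ 0 ≤ r ∧ r < 10 ∧ ((r : Int) : ZMod 10) = wsum l := by
  obtain ⟨r, hr, h0, h10, hw⟩ :=
    loopA_aux (l.length - 1) (stepA l) (by rw [length_stepA]; omega) (by omega)
      (stepA_bounds l (by omega))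
  refine ⟨r, ?_, h0, h10, ?_⟩
  · rw [loopA, dif_pos (by omega), hr]
  · rw [hw, wsum_step l h]

theorem foldB (nN : Nat) :
    ∀ (xs : List Int) (k : Nat) (t : Int), k + xs.length ≤ nN →
      ((PySem.List.enumerate xs (k : Int)).foldl
        (fun st p => (st.1 + st.2 * p.2,
            PySem.Int.floordiv (st.2 * ((nN : Int) - 1 - p.1)) (p.1 + 1)))
        (t, (Nat.choose (nN - 1) k : Int))).1
      = t + ∑ i ∈ Finset.range xs.length, (Nat.choose (nN - 1) (k + i) : Int) * xs.getD i 0 := by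
  intro xs
  induction xs with
  | nil => intro k t _; simp [PySem.List.enumerate_nil]
  | cons x xs ih =>
    intro k t hk
    have hk1 : k + 1 ≤ nN := by simp at hk; omega
    rw [PySem.List.enumerate_cons, List.foldl_cons]
    have hc : PySem.Int.floordiv ((Nat.choose (nN - 1) k : Int) * ((nN : Int) - 1 - (k : Int)))
        ((k + 1 : Nat) : Int) = (Nat.choose (nN - 1) (k + 1) : Int) := by
      have h1 : ((nN : Int) - 1 - (k : Int)) = ((nN - 1 - k : Nat) : Int) := by omega
      rw [h1, ← Nat.cast_mul, PySem.Int.floordiv_natCast]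
      rw [← Nat.choose_succ_right_eq (nN - 1) k, Nat.mul_div_cancel _ (by omega)]
    rw [show ((k : Int) + 1) = ((k + 1 : Nat) : Int) from by push_cast; ring, hc]
    rw [ih (k + 1) (t + (Nat.choose (nN - 1) k : Int) * x) (by simp at hk ⊢; omega)]
    simp only [List.length_cons]
    rw [Finset.sum_range_succ'
      (fun i => (Nat.choose (nN - 1) (k + i) : Int) * (x :: xs).getD i 0) xs.length]
    simp only [List.getD_cons_succ, List.getD_cons_zero, Nat.add_zero]
    have hsum : ∀ i ∈ Finset.range xs.length,
        (Nat.choose (nN - 1) (k + 1 + i) : Int) * xs.getD i 0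
          = (Nat.choose (nN - 1) (k + (i + 1)) : Int) * xs.getD i 0 := by
      intro i _
      rw [show k + 1 + i = k + (i + 1) from by omega]
    rw [Finset.sum_congr rfl hsum]
    ring

theorem altB_total (l : List Int) :
    1 ≤ l.length →
    ((PySem.List.enumerate l 0).foldl
        (fun st p => (st.1 + st.2 * p.2,
            PySem.Int.floordiv (st.2 * ((l.length : Int) - 1 - p.1)) (p.1 + 1)))
        ((0 : Int), (1 : Int))).1
      = ∑ i ∈ Finset.range l.length, (Nat.choose (l.length - 1) i : Int) * l.getD i 0 := by
  intro h
  simpa using foldB l.length l 0 0 (by omega)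

theorem triangularSum_spec : Claim_equal_triangularSum := by
  unfold Claim_equal_triangularSum Spec_triangularSum
  intro nums _ hpre
  have hne : 1 ≤ nums.length := by
    cases nums with
    | nil => exact absurd rfl hpre
    | cons a t => simp
  by_cases h1 : nums.length = 1
  · unfold triangularSum triangularSum_alt
    simp [h1]
  · have hlen : 2 ≤ nums.length := by omega
    obtain ⟨r, hr, hr0, hr10, hrw⟩ := loopA_spec nums hlen
    unfold triangularSum triangularSum_alt
    simp only [beq_iff_eq, h1, if_false]
    rw [hr, PySem.List.pyGetD_zero_cons, altB_total nums hne,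
      PySem.Int.mod_eq_emod_of_pos (by norm_num)]
    set S : Int := ∑ i ∈ Finset.range nums.length,
      (Nat.choose (nums.length - 1) i : Int) * nums.getD i 0 with hS
    have hScast : ((S : Int) : ZMod 10) = wsum nums := by
      unfold wsum
      rw [hS]
      push_cast
      rfl
    have hcast : ((r : Int) : ZMod 10) = ((S % 10 : Int) : ZMod 10) := by
      rw [hrw, ← hScast]
      exact (cast_pymod S).symm.trans (by rw [PySem.Int.mod_eq_emod_of_pos (by norm_num)])
    have hmodeq : r % (10 : Int) = (S % 10) % 10 :=
      (ZMod.intCast_eq_intCast_iff r (S % 10) 10).mp (by exact_mod_cast hcast)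
    rw [Int.emod_eq_of_lt hr0 hr10, Int.emod_emod_of_dvd S dvd_rfl] at hmodeq
    exact hmodeq
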